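-- pv_equiv track=rewrite | github.com/mccaigs/d2 | apps/api/app/services/answer_builder.py | _pick_projects
-- ===== SOURCE A (Python) =====
-- _PROJECT_HINTS: list[tuple[tuple[str, ...], tuple[str, ...]]] = [
--     (("recruit", "hiring", "candidate", "talent", "recruiter tool"),
--      ("CareersAI", "RecruitersAI")),
--     (("interview", "assessment", "evaluation"),
--      ("InterviewsAI", "CareersAI")),
--     (("python", "fastapi", "backend"),
--      ("InterviewsAI", "UK AI Jobs Pipeline")),
--     (("next.js", "nextjs", "frontend", "typescript"),
--      ("CareersAI", "InterviewsAI")),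
--     (("automation", "pipeline", "workflow", "scoring"),
--      ("UK AI Jobs Pipeline", "InterviewsAI")),
--     (("developer", "ide", "tooling", "devtools", "mcp"),
--      ("AI IDE Initiative", "InterviewsAI")),
--     (("ai product", "applied ai", "llm", "agent", "agentic"),
--      ("InterviewsAI", "CareersAI")),
-- ]
--
-- _DEFAULT_PROJECT_ORDER: tuple[str, ...] = (
--     "InterviewsAI", "CareersAI", "RecruitersAI",
--     "UK AI Jobs Pipeline", "AI IDE Initiative",
-- )
--
-- def _pick_projects(message: str, available: list[dict] | None = None) -> list[str]:
--     """Return up to two project names most relevant to the query, intersected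
--     with any retrieved project list so we never reference a project that isn't
--     in the data."""
--     available_names: set[str] | None = None
--     if available:
--         available_names = {p.get("name", "") for p in available if p.get("name")}
--
--     lowered = (message or "").lower()
--     ordered: list[str] = []
--     for keywords, names in _PROJECT_HINTS:
--         if any(kw in lowered for kw in keywords):
--             for n in names:
--                 if n not in ordered:
--                     ordered.append(n)
--     for n in _DEFAULT_PROJECT_ORDER:
--         if n not in ordered:
--             ordered.append(n)
--
--     if available_names is not None:
--         ordered = [n for n in ordered if n in available_names]
--
--     return ordered[:2]
-- ===== SOURCE B (Python) =====
-- _PROJECT_HINTS: list[tuple[tuple[str, ...], tuple[str, ...]]] = [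
--     (("recruit", "hiring", "candidate", "talent", "recruiter tool"),
--      ("CareersAI", "RecruitersAI")),
--     (("interview", "assessment", "evaluation"),
--      ("InterviewsAI", "CareersAI")),
--     (("python", "fastapi", "backend"),
--      ("InterviewsAI", "UK AI Jobs Pipeline")),
--     (("next.js", "nextjs", "frontend", "typescript"),
--      ("CareersAI", "InterviewsAI")),
--     (("automation", "pipeline", "workflow", "scoring"),
--      ("UK AI Jobs Pipeline", "InterviewsAI")),
--     (("developer", "ide", "tooling", "devtools", "mcp"),
--      ("AI IDE Initiative", "InterviewsAI")),
--     (("ai product", "applied ai", "llm", "agent", "agentic"),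
--      ("InterviewsAI", "CareersAI")),
-- ]
--
-- _DEFAULT_PROJECT_ORDER: tuple[str, ...] = (
--     "InterviewsAI", "CareersAI", "RecruitersAI",
--     "UK AI Jobs Pipeline", "AI IDE Initiative",
-- )
--
--
-- def _pick_projects(message: str, available: list[dict] | None = None) -> list[str]:
--     """Rank-and-sort formulation: give every candidate name a priority score
--     (its first position in the hint/default stream, computed by one reverse
--     overwrite sweep -- no membership tests), then sort the distinct names by
--     score, filter by availability and keep the top two."""
--     available_names = None
--     if available:
--         available_names = {p.get("name", "") for p in available if p.get("name")}
--
--     lowered = (message or "").lower()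
--     stream = [n for keywords, names in _PROJECT_HINTS
--               if any(kw in lowered for kw in keywords) for n in names]
--     stream += _DEFAULT_PROJECT_ORDER
--
--     # sweeping right-to-left and overwriting leaves each name's FIRST index
--     rank = {}
--     for i in range(len(stream) - 1, -1, -1):
--         rank[stream[i]] = i
--
--     picked = sorted(rank, key=rank.get)
--     if available_names is not None:
--         picked = [n for n in picked if n in available_names]
--     return picked[:2]
-- ===== Notes on version B (the rewrite author's own statement) =====
-- stated objective: alternative
-- what changed: Replaces A's incremental dedup (repeated 'n not in ordered' membership scans while appending, then filter and slice) with a rank-and-sort algorithm: one reverse sweep over the candidate stream overwrites a dict so each name keeps its first index, then the distinct names are sorted by that rank, filtered by availability and the top two returned.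
import Mathlib
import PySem

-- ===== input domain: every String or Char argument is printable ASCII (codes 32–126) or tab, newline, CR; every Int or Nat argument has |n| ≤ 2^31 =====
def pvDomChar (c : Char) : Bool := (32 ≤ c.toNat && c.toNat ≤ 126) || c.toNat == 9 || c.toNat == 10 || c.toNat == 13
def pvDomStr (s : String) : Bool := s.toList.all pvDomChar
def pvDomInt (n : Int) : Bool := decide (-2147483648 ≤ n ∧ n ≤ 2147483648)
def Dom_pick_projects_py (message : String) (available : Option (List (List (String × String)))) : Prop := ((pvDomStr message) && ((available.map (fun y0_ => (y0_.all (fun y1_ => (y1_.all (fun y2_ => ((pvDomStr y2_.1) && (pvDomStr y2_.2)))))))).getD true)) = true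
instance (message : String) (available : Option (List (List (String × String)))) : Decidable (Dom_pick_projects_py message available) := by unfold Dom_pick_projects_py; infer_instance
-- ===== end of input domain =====

-- B replaces A's incremental membership-test dedup (then filter, then slice) with a
-- rank-and-sort algorithm: a reverse overwrite sweep records each name's first index
-- in a dict, the distinct names are sorted by that rank, then filtered and cut to two;
-- objective: alternative algorithm, same observable result.

-- shared module constants (_PROJECT_HINTS, _DEFAULT_PROJECT_ORDER)
def pvHints : List (List String × List String) :=
  [ (["recruit", "hiring", "candidate", "talent", "recruiter tool"], ["CareersAI", "RecruitersAI"])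
  , (["interview", "assessment", "evaluation"], ["InterviewsAI", "CareersAI"])
  , (["python", "fastapi", "backend"], ["InterviewsAI", "UK AI Jobs Pipeline"])
  , (["next.js", "nextjs", "frontend", "typescript"], ["CareersAI", "InterviewsAI"])
  , (["automation", "pipeline", "workflow", "scoring"], ["UK AI Jobs Pipeline", "InterviewsAI"])
  , (["developer", "ide", "tooling", "devtools", "mcp"], ["AI IDE Initiative", "InterviewsAI"])
  , (["ai product", "applied ai", "llm", "agent", "agentic"], ["InterviewsAI", "CareersAI"]) ]

def pvDefaults : List String :=
  ["InterviewsAI", "CareersAI", "RecruitersAI", "UK AI Jobs Pipeline", "AI IDE Initiative"]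

-- `available_names` (identical lines in Source A and Source B): None if `available` is falsy, else
-- {p.get("name","") for p in available if p.get("name")}
def pvAvailNames (available : Option (List (List (String × String)))) : Option (PySem.Set String) :=
  match available with
  | none => none
  | some av =>
      if av.isEmpty then none
      else some (av.foldl (fun s p =>
        if PySem.Dict.getD (PySem.Dict.mk p) "name" "" ≠ "" then
          PySem.Set.add s (PySem.Dict.getD (PySem.Dict.mk p) "name" "") else s)
        PySem.Set.empty)

-- ===== PORT A =====
def pick_projects_py (message : String) (available : Option (List (List (String × String)))) : List String :=
  let availableNames := pvAvailNames available
  let lowered := PySem.Str.lower (if message = "" then "" else message)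
  let ordered := pvHints.foldl (fun acc kwn =>
      if kwn.1.any (fun kw => PySem.Str.isIn kw lowered)
      then kwn.2.foldl (fun a n => if n ∈ a then a else a ++ [n]) acc
      else acc) []
  let ordered := pvDefaults.foldl (fun a n => if n ∈ a then a else a ++ [n]) ordered
  let ordered := match availableNames with
    | none => ordered
    | some s => ordered.filter (fun n => PySem.Set.contains s n)
  ordered.take 2

-- ===== PORT B =====
def pick_projects_py_alt (message : String) (available : Option (List (List (String × String)))) : List String :=
  let availableNames := pvAvailNames available
  let lowered := PySem.Str.lower (if message = "" then "" else message)
  let stream := (pvHints.flatMap fun kwn =>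
      if kwn.1.any (fun kw => PySem.Str.isIn kw lowered) then kwn.2 else []) ++ pvDefaults
  -- `for i in range(len(stream)-1, -1, -1): rank[stream[i]] = i`
  let rank := (PySem.List.pyRange (PySem.List.len stream - 1) (-1) (-1)).foldl
      (fun d i => d.insert (PySem.List.pyGetD stream i "") i) PySem.Dict.empty
  -- `sorted(rank, key=rank.get)` (every key is present, so rank.get returns its int rank)
  let picked := PySem.List.sorted rank.keys (fun n => rank.getD n 0)
  let picked := match availableNames with
    | none => picked
    | some s => picked.filter (fun n => PySem.Set.contains s n)
  picked.take 2

-- ===== PRECONDITION & SPEC =====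
def Spec_pick_projects_py (message : String) (available : Option (List (List (String × String)))) (out : List String) : Prop := out = pick_projects_py_alt message available
instance (message : String) (available : Option (List (List (String × String)))) (out : List String) : Decidable (Spec_pick_projects_py message available out) := by unfold Spec_pick_projects_py; infer_instance

-- ===== CLAIM =====
def Claim_equal_pick_projects_py : Prop := ∀ (message : String) (available : Option (List (List (String × String)))), Dom_pick_projects_py message available → Spec_pick_projects_py message available (pick_projects_py message available)

-- ===== LEMMAS AND PROOFS =====

-- first occurrences of cs that are not in `seen`, in order (characterises A's dedup loops)
def pvDedupFrom (seen : List String) : List String → List String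
  | [] => []
  | n :: cs => if n ∈ seen then pvDedupFrom seen cs else n :: pvDedupFrom (seen ++ [n]) cs

-- the rank dict of B, built front-to-back (proof-side mirror of the reverse sweep)
def pvRank : List String → Int → PySem.Dict String Int
  | [], _ => PySem.Dict.empty
  | x :: t, off => (pvRank t (off + 1)).insert x off

lemma pvFoldA_eq (cs : List String) :
    ∀ acc, cs.foldl (fun a n => if n ∈ a then a else a ++ [n]) acc = acc ++ pvDedupFrom acc cs := by
  induction cs with
  | nil => intro acc; simp [pvDedupFrom]
  | cons n cs ih =>
    intro acc
    simp only [List.foldl_cons, pvDedupFrom]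
    by_cases h : n ∈ acc <;> simp [h, ih]

lemma pvHintFold (hints : List (List String × List String)) (c : List String × List String → Bool) :
    ∀ acc : List String,
      hints.foldl (fun acc kwn =>
        if c kwn then kwn.2.foldl (fun a n => if n ∈ a then a else a ++ [n]) acc else acc) acc
      = (hints.flatMap fun kwn => if c kwn then kwn.2 else []).foldl
          (fun a n => if n ∈ a then a else a ++ [n]) acc := by
  induction hints with
  | nil => intro acc; simp
  | cons h t ih =>
    intro acc
    by_cases hc : c h <;> simp [hc, List.foldl_append, ih]

lemma pvDedupFrom_congr (cs : List String) :
    ∀ seen seen', (∀ y, y ∈ seen ↔ y ∈ seen') → pvDedupFrom seen cs = pvDedupFrom seen' cs := by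
  induction cs with
  | nil => intro _ _ _; simp [pvDedupFrom]
  | cons n cs ih =>
    intro seen seen' h
    simp only [pvDedupFrom]
    by_cases hn : n ∈ seen
    · rw [if_pos hn, if_pos ((h n).mp hn)]; exact ih _ _ h
    · rw [if_neg hn, if_neg (fun hc => hn ((h n).mpr hc))]
      exact congrArg (n :: ·) (ih _ _ (by intro y; simp [h y]))

lemma mem_pvDedupFrom (cs : List String) :
    ∀ seen y, y ∈ pvDedupFrom seen cs ↔ y ∈ cs ∧ y ∉ seen := by
  induction cs with
  | nil => intro seen y; simp [pvDedupFrom]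
  | cons n cs ih =>
    intro seen y
    simp only [pvDedupFrom]
    by_cases hn : n ∈ seen
    · rw [if_pos hn]
      constructor
      · intro h
        exact ⟨List.mem_cons_of_mem _ ((ih seen y).mp h).1, ((ih seen y).mp h).2⟩
      · rintro ⟨hy, hys⟩
        rcases List.mem_cons.mp hy with rfl | hy
        · exact absurd hn hys
        · exact (ih seen y).mpr ⟨hy, hys⟩
    · rw [if_neg hn]
      constructor
      · intro h
        rcases List.mem_cons.mp h with rfl | h
        · exact ⟨List.mem_cons_self, hn⟩
        · have := (ih _ y).mp h
          refine ⟨List.mem_cons_of_mem _ this.1, fun hc => this.2 (by simp [hc])⟩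
      · rintro ⟨hy, hys⟩
        rcases List.mem_cons.mp hy with rfl | hy
        · exact List.mem_cons_self
        · by_cases hyn : y = n
          · subst hyn; exact List.mem_cons_self
          · exact List.mem_cons_of_mem _ ((ih _ y).mpr ⟨hy, by simp [hys, hyn]⟩)

lemma nodup_pvDedupFrom (cs : List String) : ∀ seen, (pvDedupFrom seen cs).Nodup := by
  induction cs with
  | nil => intro seen; simp [pvDedupFrom]
  | cons n cs ih =>
    intro seen
    simp only [pvDedupFrom]
    by_cases hn : n ∈ seen
    · rw [if_pos hn]; exact ih seen
    · rw [if_neg hn]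
      refine List.nodup_cons.mpr ⟨fun hc => ?_, ih _⟩
      exact ((mem_pvDedupFrom cs _ n).mp hc).2 (by simp)

lemma pvDedupFrom_seen_append (cs : List String) :
    ∀ seen x, pvDedupFrom (seen ++ [x]) cs = (pvDedupFrom seen cs).filter (fun y => y != x) := by
  induction cs with
  | nil => intro seen x; simp [pvDedupFrom]
  | cons n cs ih =>
    intro seen x
    simp only [pvDedupFrom]
    by_cases hn : n ∈ seen
    · rw [if_pos hn, if_pos (by simp [hn]), ih]
    · rw [if_neg hn]
      by_cases hx : n = x
      · subst hx
        rw [if_pos (by simp), List.filter_cons_of_neg (by simp)]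
        refine (List.filter_eq_self.mpr ?_).symm
        intro y hy
        have := (mem_pvDedupFrom cs (seen ++ [n]) y).mp hy
        simp only [List.mem_append, List.mem_singleton, not_or] at this
        simp [this.2.2]
      · rw [if_neg (by simp [hn, hx]), List.filter_cons_of_pos (by simp [hx])]
        refine congrArg (n :: ·) ?_
        rw [pvDedupFrom_congr cs (seen ++ [x] ++ [n]) (seen ++ [n] ++ [x]) (by intro y; simp; tauto)]
        exact ih (seen ++ [n]) x

lemma pvDedupFrom_pairwise_idxOf (xs : List String) :
    (pvDedupFrom [] xs).Pairwise (fun a b => xs.idxOf a < xs.idxOf b) := by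
  induction xs with
  | nil => simp [pvDedupFrom]
  | cons x t ih =>
    have hcons : pvDedupFrom [] (x :: t) = x :: (pvDedupFrom [] t).filter (fun y => y != x) := by
      rw [show pvDedupFrom [] (x :: t) = x :: pvDedupFrom ([] ++ [x]) t from by
            simp [pvDedupFrom], pvDedupFrom_seen_append]
    rw [hcons]
    refine List.pairwise_cons.mpr ⟨?_, ?_⟩
    · intro b hb
      have hbx : b ≠ x := by simpa using (List.of_mem_filter hb)
      rw [List.idxOf_cons_self, List.idxOf_cons_ne _ (fun h => hbx h.symm)]
      exact Nat.succ_pos _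
    · have hpw : ((pvDedupFrom [] t).filter (fun y => y != x)).Pairwise
          (fun a b => t.idxOf a < t.idxOf b) :=
        List.Pairwise.sublist List.filter_sublist ih
      refine hpw.imp_of_mem ?_
      intro a b ha hb hab
      have hax : a ≠ x := by simpa using (List.of_mem_filter ha)
      have hbx : b ≠ x := by simpa using (List.of_mem_filter hb)
      rw [List.idxOf_cons_ne _ (fun h => hax h.symm), List.idxOf_cons_ne _ (fun h => hbx h.symm)]
      exact Nat.succ_lt_succ hab

lemma get?_pvRank (xs : List String) :
    ∀ (off : Int) (n : String),
      (pvRank xs off).get? n = if n ∈ xs then some (off + (xs.idxOf n : Int)) else none := by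
  induction xs with
  | nil => intro off n; simp [pvRank, PySem.Dict.get?_empty]
  | cons x t ih =>
    intro off n
    rw [pvRank, PySem.Dict.get?_insert]
    by_cases hx : n = x
    · subst hx; simp [List.idxOf_cons_self]
    · rw [if_neg hx, ih]
      by_cases hm : n ∈ t
      · rw [if_pos hm, if_pos (List.mem_cons_of_mem _ hm),
            List.idxOf_cons_ne _ (fun h => hx h.symm)]
        congr 1
        push_cast [Nat.succ_eq_add_one]
        ring
      · rw [if_neg hm, if_neg (by simp [hx, hm])]

lemma mem_keys_pvRank (xs : List String) :
    ∀ (off : Int) (n : String), n ∈ (pvRank xs off).keys ↔ n ∈ xs := by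
  induction xs with
  | nil => intro off n; simp [pvRank, PySem.Dict.keys_empty]
  | cons x t ih =>
    intro off n
    rw [pvRank, PySem.Dict.mem_keys_insert]
    simp [ih]

lemma nodup_keys_pvRank (xs : List String) : ∀ (off : Int), (pvRank xs off).keys.Nodup := by
  induction xs with
  | nil => intro off; exact PySem.Dict.nodup_keys_empty
  | cons x t ih => intro off; exact PySem.Dict.nodup_keys_insert _ _ _ (ih _)

lemma pvRange_desc (n : Nat) :
    PySem.List.pyRange ((n : Int) - 1) (-1) (-1)
      = ((List.range n).map (fun k : Nat => (k : Int))).reverse := by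
  rw [PySem.List.pyRange_of_neg _ _ (by omega : (-1 : Int) < 0)]
  rcases Nat.eq_zero_or_pos n with rfl | hn
  · simp
  · rw [if_pos (by omega)]
    have hcount : (((n : Int) - 1 - -1 + - -1 - 1) / - -1).toNat = n := by
      push_cast; omega
    rw [hcount]
    apply List.ext_getElem
    · simp
    · intro i h1 h2
      simp only [List.length_map, List.length_range] at h1
      simp only [List.getElem_reverse, List.getElem_map, List.getElem_range,
        List.length_map, List.length_range]
      omega

lemma pvRank_foldr (xs : List String) :
    ∀ (off : Int),
      (List.range xs.length).foldr (fun k d => d.insert (xs.getD k "") (off + (k : Int)))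
        PySem.Dict.empty = pvRank xs off := by
  induction xs with
  | nil => intro off; simp [pvRank]
  | cons x t ih =>
    intro off
    rw [List.length_cons, List.range_succ_eq_map, List.foldr_cons, List.foldr_map]
    have hf : (fun (k : Nat) (d : PySem.Dict String Int) =>
          d.insert ((x :: t).getD (Nat.succ k) "") (off + (Nat.succ k : Int)))
        = (fun k d => d.insert (t.getD k "") ((off + 1) + (k : Int))) := by
      funext k d
      simp only [Nat.succ_eq_add_one, List.getD_cons_succ]
      congr 1
      push_cast
      ring
    rw [hf, ih (off + 1), pvRank]
    simp

lemma pvRank_fold_eq (xs : List String) :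
    (PySem.List.pyRange (PySem.List.len xs - 1) (-1) (-1)).foldl
        (fun d i => d.insert (PySem.List.pyGetD xs i "") i) PySem.Dict.empty
      = pvRank xs 0 := by
  rw [PySem.List.len_eq, pvRange_desc, List.foldl_reverse, List.foldr_map]
  have hg : (fun (k : Nat) (y : PySem.Dict String Int) =>
        y.insert (PySem.List.pyGetD xs (k : Int) "") (k : Int))
      = (fun k d => d.insert (xs.getD k "") ((0 : Int) + (k : Int))) := by
    funext k y
    rw [PySem.List.pyGetD_natCast, zero_add]
  rw [hg, pvRank_foldr xs 0]

lemma pvSorted_keys (xs : List String) :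
    PySem.List.sorted (pvRank xs 0).keys (fun n => (pvRank xs 0).getD n 0)
      = pvDedupFrom [] xs := by
  apply PySem.List.sorted_eq_of_perm_of_pairwise_lt
  · exact (List.perm_ext_iff_of_nodup (nodup_pvDedupFrom xs []) (nodup_keys_pvRank xs 0)).mpr
      (by intro a; rw [mem_pvDedupFrom, mem_keys_pvRank]; simp)
  · have hkey : ∀ n ∈ pvDedupFrom [] xs, (pvRank xs 0).getD n 0 = (xs.idxOf n : Int) := by
      intro n hn
      have hmem : n ∈ xs := ((mem_pvDedupFrom xs [] n).mp hn).1
      rw [PySem.Dict.getD_eq_get?_getD, get?_pvRank, if_pos hmem]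
      simp
    refine (pvDedupFrom_pairwise_idxOf xs).imp_of_mem ?_
    intro a b ha hb hab
    rw [hkey a ha, hkey b hb]
    exact_mod_cast hab

-- ===== VERDICT =====
theorem pick_projects_py_spec : Claim_equal_pick_projects_py := by
  intro message available _
  show pick_projects_py message available = pick_projects_py_alt message available
  simp only [pick_projects_py, pick_projects_py_alt]
  rw [pvHintFold pvHints (fun kwn => kwn.1.any (fun kw => PySem.Str.isIn kw
        (PySem.Str.lower (if message = "" then "" else message))))]
  rw [← List.foldl_append, pvFoldA_eq, pvRank_fold_eq, pvSorted_keys]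
  simp
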